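-- pv_equiv track=rewrite | github.com/jamancio/path-of-least-resistance-conjecture | test_files_archive/PLR_Tests/PLR_Historical_Fingerprint.py | get_pas_k_min
-- ===== SOURCE A (Python) =====
-- def get_pas_k_min(anchor_sn, prime_set):
--     """Finds the k_min for a given anchor."""
--     min_distance_k = 0
--     search_dist = 1
--     while True:
--         q_lower = anchor_sn - search_dist
--         q_upper = anchor_sn + search_dist
--         if q_lower in prime_set:
--             min_distance_k = search_dist
--             break
--         if q_upper in prime_set:
--             min_distance_k = search_dist
--             break
--         search_dist += 1
--         if search_dist > 2000: return -1 # Failsafe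
--     return min_distance_k
-- ===== SOURCE B (Python) =====
-- def get_pas_k_min(anchor_sn, prime_set):
--     """Finds the k_min for a given anchor."""
--     dists = [d for d in (abs(anchor_sn - p) for p in prime_set) if 1 <= d <= 2000]
--     return min(dists) if dists else -1
-- ===== Notes on version B (the rewrite author's own statement) =====
-- stated objective: alternative
-- what changed: B iterates once over prime_set computing |anchor_sn - p| and takes the minimum of the distances in [1,2000] (or -1 if none), instead of A's outward scan over distances 1..2000 with a membership test per distance.
import Mathlib
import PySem

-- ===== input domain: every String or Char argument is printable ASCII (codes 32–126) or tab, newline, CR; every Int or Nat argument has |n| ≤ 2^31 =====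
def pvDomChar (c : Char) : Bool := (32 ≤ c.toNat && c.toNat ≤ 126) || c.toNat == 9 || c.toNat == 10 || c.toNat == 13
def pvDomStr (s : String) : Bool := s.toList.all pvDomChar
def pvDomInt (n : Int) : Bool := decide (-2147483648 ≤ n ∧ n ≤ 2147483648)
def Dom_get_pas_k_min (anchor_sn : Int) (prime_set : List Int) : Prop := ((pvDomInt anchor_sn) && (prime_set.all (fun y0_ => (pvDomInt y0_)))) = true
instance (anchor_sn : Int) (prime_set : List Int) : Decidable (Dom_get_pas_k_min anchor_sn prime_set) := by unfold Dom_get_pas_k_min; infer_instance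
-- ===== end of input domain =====

-- B traverses prime_set once taking the min of |anchor_sn - p| in [1,2000] (-1 if none),
-- instead of A's outward scan over distances; proved to return the same value.

-- ===== PORT A =====
-- A's `while True` loop: search_dist goes 1,2,…; the failsafe check `search_dist > 2000`
-- bounds it, so fuel 2000 (one unit per iteration) is never exhausted before the
-- failsafe fires; the `| 0 => -1` arm is unreachable from the entry call.
def pvLoopA (anchor_sn : Int) (prime_set : List Int) : Nat → Int → Int
  | 0, _ => -1
  | n+1, search_dist =>
    if (anchor_sn - search_dist) ∈ prime_set then search_dist
    else if (anchor_sn + search_dist) ∈ prime_set then search_dist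
    else if search_dist + 1 > 2000 then -1
    else pvLoopA anchor_sn prime_set n (search_dist + 1)

def get_pas_k_min (anchor_sn : Int) (prime_set : List Int) : Int :=
  pvLoopA anchor_sn prime_set 2000 1

-- ===== PORT B =====
def get_pas_k_min_alt (anchor_sn : Int) (prime_set : List Int) : Int :=
  let dists := (prime_set.map (fun p => |anchor_sn - p|)).filter
      (fun d => decide (1 ≤ d) && decide (d ≤ 2000))
  match PySem.List.min? dists (fun x => x) with
  | some m => m
  | none => -1

-- ===== PRECONDITION & SPEC =====
def Spec_get_pas_k_min (anchor_sn : Int) (prime_set : List Int) (out : Int) : Prop := out = get_pas_k_min_alt anchor_sn prime_set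
instance (anchor_sn : Int) (prime_set : List Int) (out : Int) : Decidable (Spec_get_pas_k_min anchor_sn prime_set out) := by unfold Spec_get_pas_k_min; infer_instance

-- ===== CLAIM (what is proved, stated in full; the proofs are below) =====
def Claim_equal_get_pas_k_min : Prop := ∀ (anchor_sn : Int) (prime_set : List Int), Dom_get_pas_k_min anchor_sn prime_set → Spec_get_pas_k_min anchor_sn prime_set (get_pas_k_min anchor_sn prime_set)

-- ===== LEMMAS AND PROOFS =====

-- B's filtered distance list
def pvL (a : Int) (ps : List Int) : List Int :=
  (ps.map (fun p => |a - p|)).filter (fun d => decide (1 ≤ d) && decide (d ≤ 2000))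

theorem pvMem_L (a d : Int) (ps : List Int) :
    d ∈ pvL a ps ↔ (((a - d) ∈ ps ∨ (a + d) ∈ ps) ∧ 1 ≤ d ∧ d ≤ 2000) := by
  unfold pvL
  simp only [List.mem_filter, List.mem_map, Bool.and_eq_true, decide_eq_true_eq]
  constructor
  · rintro ⟨⟨p, hp, rfl⟩, h1, h2⟩
    refine ⟨?_, h1, h2⟩
    rcases abs_cases (a - p) with ⟨he, _⟩ | ⟨he, _⟩
    · left; have : p = a - |a - p| := by omega
      rwa [← this]
    · right; have : p = a + |a - p| := by omega
      rwa [← this]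
  · rintro ⟨hmem, h1, h2⟩
    refine ⟨?_, h1, h2⟩
    rcases hmem with h | h
    · exact ⟨a - d, h, by rw [abs_of_nonneg] <;> omega⟩
    · exact ⟨a + d, h, by rw [abs_of_nonpos] <;> omega⟩

theorem pvL_bounds (a : Int) (ps : List Int) : ∀ x ∈ pvL a ps, 1 ≤ x ∧ x ≤ 2000 := by
  intro x hx; exact ((pvMem_L a x ps).1 hx).2

-- minimum of a list that contains d with every element ≥ d is d
theorem pvMin_of_least {M : List Int} {d : Int} (hd : d ∈ M) (hle : ∀ x ∈ M, d ≤ x) :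
    PySem.List.min? M (fun x => x) = some d := by
  cases hM : PySem.List.min? M (fun x => x) with
  | none =>
    rw [PySem.List.min?_eq_none_iff] at hM
    subst hM; cases hd
  | some m =>
    have hmem := PySem.List.min?_mem hM
    have hmd : m ≤ d := by simpa using PySem.List.min?_isMin hM d hd
    have hdm : d ≤ m := hle m hmem
    have : m = d := le_antisymm hmd hdm
    rw [this]

-- loop characterization: from search_dist d (with d + n = 2001), A's loop returns
-- the minimum of the distances in pvL that are ≥ d, or -1 if there is none.
theorem pvLoop_spec (a : Int) (ps : List Int) :
    ∀ (n : Nat) (d : Int), 1 ≤ d → d + n = 2001 →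
      pvLoopA a ps n d =
        (match PySem.List.min? ((pvL a ps).filter (fun x => decide (d ≤ x))) (fun x => x) with
         | some m => m
         | none => -1) := by
  intro n
  induction n with
  | zero =>
    intro d h1 h2
    have hfilt : (pvL a ps).filter (fun x => decide (d ≤ x)) = [] := by
      rw [List.filter_eq_nil_iff]
      intro x hx
      have := pvL_bounds a ps x hx
      simp only [decide_eq_true_eq]
      omega
    simp [pvLoopA, hfilt, PySem.List.min?]
  | succ n ih =>
    intro d h1 h2
    by_cases hlo : (a - d) ∈ ps
    · have hdL : d ∈ pvL a ps := (pvMem_L a d ps).2 ⟨Or.inl hlo, h1, by omega⟩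
      have hdF : d ∈ (pvL a ps).filter (fun x => decide (d ≤ x)) := by
        rw [List.mem_filter]; exact ⟨hdL, by simp⟩
      rw [pvMin_of_least hdF (by intro x hx; rw [List.mem_filter] at hx; simpa using hx.2)]
      simp [pvLoopA, hlo]
    · by_cases hhi : (a + d) ∈ ps
      · have hdL : d ∈ pvL a ps := (pvMem_L a d ps).2 ⟨Or.inr hhi, h1, by omega⟩
        have hdF : d ∈ (pvL a ps).filter (fun x => decide (d ≤ x)) := by
          rw [List.mem_filter]; exact ⟨hdL, by simp⟩
        rw [pvMin_of_least hdF (by intro x hx; rw [List.mem_filter] at hx; simpa using hx.2)]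
        simp [pvLoopA, hlo, hhi]
      · -- d is not a hit, so it is not in pvL; the filter threshold moves to d+1
        have hdnot : d ∉ pvL a ps := by
          rw [pvMem_L]; rintro ⟨h, _, _⟩; rcases h with h | h <;> [exact hlo h; exact hhi h]
        have hfe : (pvL a ps).filter (fun x => decide (d ≤ x))
                 = (pvL a ps).filter (fun x => decide (d + 1 ≤ x)) := by
          apply List.filter_congr
          intro x hx
          have hne : x ≠ d := fun h => hdnot (h ▸ hx)
          simp only [decide_eq_decide]
          omega
        by_cases h2000 : d + 1 > 2000
        · have hd : d = 2000 := by omega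
          have hfilt : (pvL a ps).filter (fun x => decide (d + 1 ≤ x)) = [] := by
            rw [List.filter_eq_nil_iff]
            intro x hx
            have := pvL_bounds a ps x hx
            simp only [decide_eq_true_eq]
            omega
          have hA : pvLoopA a ps (n+1) d = -1 := by simp [pvLoopA, hlo, hhi, h2000]
          rw [hA, hfe, hfilt]
          simp [PySem.List.min?]
        · have := ih (d + 1) (by omega) (by omega)
          simp only [pvLoopA, hlo, hhi, h2000, if_false]
          rw [this, hfe]

-- ===== VERDICT (by name: the statement is the Claim_ definition above) =====
theorem get_pas_k_min_spec : Claim_equal_get_pas_k_min := by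
  intro a ps _
  unfold Spec_get_pas_k_min get_pas_k_min get_pas_k_min_alt
  have h := pvLoop_spec a ps 2000 1 (by omega) (by omega)
  have hfilt : (pvL a ps).filter (fun x => decide ((1:Int) ≤ x)) = pvL a ps := by
    rw [List.filter_eq_self]
    intro x hx
    have := pvL_bounds a ps x hx
    simp only [decide_eq_true_eq]
    omega
  rw [h, hfilt]
  rfl
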